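-- pv_equiv track=rewrite | github.com/LucasBN/Bioinformatics | DNAToolKit.py | locateProteinMotif
-- ===== SOURCE A (Python) =====
-- def locateProteinMotif(proteinString, motif):
--
--     positions = []
--
--     for i in range(len(proteinString)-len(motif)+1):
--         counter = 0
--         for j in range(len(motif)):
--             if motif[j][0] == '[':
--                 for k in range(1, len(motif[j])-1):
--                     if proteinString[i+j] == motif[j][k]:
--                         counter += 1
--             elif motif[j][0] == '{':
--                 for k in range(1, len(motif[j])-1):
--                     if proteinString[i+j] != motif[j][k]:
--                         counter += 1
--             else:
--                 if proteinString[i+j] == motif[j]: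
--                     counter += 1
--         if counter == 4:
--             positions.append(i+1)
--
--     return positions
-- ===== SOURCE B (Python) =====
-- def locateProteinMotif(proteinString, motif):
--     # Transposed pass order: maintain a per-position counter vector and loop
--     # over motif elements on the outside, adding each element's contribution
--     # to every start position at once.
--     n = len(proteinString) - len(motif) + 1
--     if n <= 0:
--         return []
--     counts = [0] * n
--     for j, elem in enumerate(motif):
--         if elem[0] == '[':
--             chars = elem[1:-1]
--             counts = [c + sum(proteinString[i + j] == ch for ch in chars)
--                       for i, c in enumerate(counts)]
--         elif elem[0] == '{':
--             chars = elem[1:-1]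
--             counts = [c + sum(proteinString[i + j] != ch for ch in chars)
--                       for i, c in enumerate(counts)]
--         else:
--             counts = [c + (proteinString[i + j] == elem)
--                       for i, c in enumerate(counts)]
--     return [i + 1 for i, c in enumerate(counts) if c == 4]
-- ===== Notes on version B (the rewrite author's own statement) =====
-- stated objective: alternative
-- what changed: B transposes the nested loops: it maintains a per-position integer counter vector of length len(proteinString)-len(motif)+1, loops outer over motif elements adding each element's contribution into every position at once, then emits i+1 where the counter reaches 4, instead of A's rolling counter recomputed position by position.
-- outside the precondition, e.g. on locateProteinMotif('AB', ['', 'A']): A raises IndexError, B raises IndexError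
import Mathlib
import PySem

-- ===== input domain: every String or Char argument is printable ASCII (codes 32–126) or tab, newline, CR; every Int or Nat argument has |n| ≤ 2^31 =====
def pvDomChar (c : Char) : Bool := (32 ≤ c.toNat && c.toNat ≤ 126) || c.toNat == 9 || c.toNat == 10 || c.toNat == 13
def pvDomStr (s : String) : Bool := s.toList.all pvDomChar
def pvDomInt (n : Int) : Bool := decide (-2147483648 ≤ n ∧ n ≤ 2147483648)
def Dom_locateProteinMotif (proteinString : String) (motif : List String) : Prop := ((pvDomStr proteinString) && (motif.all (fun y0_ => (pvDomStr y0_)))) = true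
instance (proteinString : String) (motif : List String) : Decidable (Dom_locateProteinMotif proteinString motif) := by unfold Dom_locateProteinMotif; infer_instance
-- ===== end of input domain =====

-- B transposes the two nested loops: it keeps a per-position counter vector, updated once per
-- motif element, instead of A's rolling counter per start position (objective: alternative).
-- pyGetD defaults below are exact: inside Pre_ every index either program takes is in range.

-- ===== PORT A =====
-- one step of A's inner 'for j' loop: the branch on motif[j][0] with its 'for k' scans
def pvStepA (s : List Char) (i j : Int) (e : List Char) (counter : Int) : Int :=
  if PySem.List.pyGetD e 0 ' ' == '[' then
    (PySem.List.pyRange 1 ((e.length : Int) - 1) 1).foldl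
      (fun counter k =>
        if PySem.List.pyGetD s (i + j) ' ' == PySem.List.pyGetD e k ' ' then counter + 1 else counter)
      counter
  else if PySem.List.pyGetD e 0 ' ' == '{' then
    (PySem.List.pyRange 1 ((e.length : Int) - 1) 1).foldl
      (fun counter k =>
        if PySem.List.pyGetD s (i + j) ' ' != PySem.List.pyGetD e k ' ' then counter + 1 else counter)
      counter
  else
    if [PySem.List.pyGetD s (i + j) ' '] == e then counter + 1 else counter

def locateProteinMotif (proteinString : String) (motif : List String) : List Int :=
  let s := proteinString.toList
  (PySem.List.pyRange 0 ((s.length : Int) - motif.length + 1) 1).foldl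
    (fun positions i =>
      let counter :=
        (PySem.List.pyRange 0 (motif.length : Int) 1).foldl
          (fun counter j => pvStepA s i j (PySem.List.pyGetD motif j "").toList counter)
          (0 : Int)
      if counter == 4 then positions ++ [i + 1] else positions)
    []

-- ===== PORT B =====
-- one step of B's 'for j, elem' loop: rebuild the whole counter vector adding elem's contribution
def pvStepB (s : List Char) (counts : List Int) (je : Int × String) : List Int :=
  let j := je.1
  let e := je.2.toList
  if PySem.List.pyGetD e 0 ' ' == '[' then
    let chars := PySem.List.slice e (some 1) (some (-1))
    (PySem.List.enumerate counts).map (fun ic =>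
      ic.2 + (chars.map (fun ch => if PySem.List.pyGetD s (ic.1 + j) ' ' == ch then (1 : Int) else 0)).sum)
  else if PySem.List.pyGetD e 0 ' ' == '{' then
    let chars := PySem.List.slice e (some 1) (some (-1))
    (PySem.List.enumerate counts).map (fun ic =>
      ic.2 + (chars.map (fun ch => if PySem.List.pyGetD s (ic.1 + j) ' ' != ch then (1 : Int) else 0)).sum)
  else
    (PySem.List.enumerate counts).map (fun ic =>
      ic.2 + (if [PySem.List.pyGetD s (ic.1 + j) ' '] == e then (1 : Int) else 0))

def locateProteinMotif_alt (proteinString : String) (motif : List String) : List Int :=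
  let s := proteinString.toList
  let n : Int := (s.length : Int) - motif.length + 1
  if n ≤ 0 then []
  else
    let counts : List Int := List.replicate n.toNat 0
    let counts := (PySem.List.enumerate motif).foldl (pvStepB s) counts
    ((PySem.List.enumerate counts).filter (fun ic => ic.2 == 4)).map (fun ic => ic.1 + 1)

-- ===== PRECONDITION & SPEC =====
-- Pre_ excludes exactly the inputs where Python A raises IndexError: motif containing an empty
-- element "" while at least one start position exists (A then evaluates motif[j][0] on "").
def Pre_locateProteinMotif (proteinString : String) (motif : List String) : Prop :=
  "" ∉ motif ∨ (proteinString.toList.length : Int) - motif.length + 1 ≤ 0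

instance (proteinString : String) (motif : List String) : Decidable (Pre_locateProteinMotif proteinString motif) := by unfold Pre_locateProteinMotif; infer_instance

def pvWitness_locateProteinMotif : String × List String := ("MASNQK", ["[MN]", "A", "{Q}", "[SN]"])

def Spec_locateProteinMotif (proteinString : String) (motif : List String) (out : List Int) : Prop := out = locateProteinMotif_alt proteinString motif
instance (proteinString : String) (motif : List String) (out : List Int) : Decidable (Spec_locateProteinMotif proteinString motif out) := by unfold Spec_locateProteinMotif; infer_instance

-- ===== CLAIM (what is proved, stated in full; the proofs are below) =====
def Claim_equal_locateProteinMotif : Prop := ∀ (proteinString : String) (motif : List String), Dom_locateProteinMotif proteinString motif → Pre_locateProteinMotif proteinString motif → Spec_locateProteinMotif proteinString motif (locateProteinMotif proteinString motif)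

-- ===== LEMMAS AND PROOFS =====

-- the contribution of motif element (j, e) at start position i (B's per-branch summand)
def pvContrib (s : List Char) (i j : Int) (e : List Char) : Int :=
  if PySem.List.pyGetD e 0 ' ' == '[' then
    ((PySem.List.slice e (some 1) (some (-1))).map
      (fun ch => if PySem.List.pyGetD s (i + j) ' ' == ch then (1 : Int) else 0)).sum
  else if PySem.List.pyGetD e 0 ' ' == '{' then
    ((PySem.List.slice e (some 1) (some (-1))).map
      (fun ch => if PySem.List.pyGetD s (i + j) ' ' != ch then (1 : Int) else 0)).sum
  else
    if [PySem.List.pyGetD s (i + j) ' '] == e then (1 : Int) else 0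

theorem pv_slice_one_negone (e : List Char) :
    PySem.List.slice e (some 1) (some (-1)) = e.dropLast.drop 1 := by
  rcases e with _ | ⟨a, t⟩
  · rfl
  · simp [PySem.List.slice, PySem.List.clampIdx, List.dropLast_eq_take, List.drop_take]
    rw [if_neg (by omega)]
    omega

-- A's 'for k in range(1, len(e)-1)' counting loop is B's 0/1-sum over the slice e[1:-1]
theorem pv_loopK (P : Char → Bool) (e : List Char) (c : Int) :
    (PySem.List.pyRange 1 ((e.length : Int) - 1) 1).foldl
      (fun c k => if P (PySem.List.pyGetD e k ' ') then c + 1 else c) c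
    = c + ((PySem.List.slice e (some 1) (some (-1))).map
        (fun ch => if P ch then (1 : Int) else 0)).sum := by
  rw [pv_slice_one_negone, PySem.List.sum_map_ite_one_zero]
  rcases eq_or_ne e [] with rfl | hne
  · simp [PySem.List.pyRange_one_eq_nil]
  · have hlen : ((e.length : Int) - 1) = (e.dropLast.length : Int) := by
      have := List.length_pos_iff.mpr hne
      simp [List.length_dropLast]; omega
    rw [hlen]
    trans ((PySem.List.pyRange 1 (e.dropLast.length : Int) 1).foldl
        (fun c k => if P (PySem.List.pyGetD e.dropLast k ' ') then c + 1 else c) c)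
    · apply PySem.List.foldl_congr_mem
      intro acc k hk
      rw [PySem.List.mem_pyRange_one] at hk
      have hk2 : k < (e.dropLast.length : Int) := hk.2
      have h1 : PySem.List.pyGetD e k ' ' = PySem.List.pyGetD e.dropLast k ' ' := by
        rw [PySem.List.pyGetD_eq_getElem e ' ' (by omega) (by omega),
            PySem.List.pyGetD_eq_getElem e.dropLast ' ' (by omega) hk2]
        exact (List.getElem_dropLast _).symm
      rw [h1]
    · rw [PySem.List.foldl_pyRange_pyGetD' (a := 1) e.dropLast ' '
            (fun c ch => if P ch then c + 1 else c) c (by norm_num)]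
      rw [PySem.List.foldl_if_add_one]
      norm_num

theorem pv_stepA_eq (s : List Char) (i j : Int) (e : List Char) (c : Int) :
    pvStepA s i j e c = c + pvContrib s i j e := by
  unfold pvStepA pvContrib
  split_ifs with h1 h2 h3
  · exact pv_loopK (fun ch => PySem.List.pyGetD s (i + j) ' ' == ch) e c
  · exact pv_loopK (fun ch => PySem.List.pyGetD s (i + j) ' ' != ch) e c
  · omega
  · omega

theorem pv_enum_range_map (n : Int) (g : Int → Int) :
    PySem.List.enumerate ((PySem.List.pyRange 0 n 1).map g)
    = (PySem.List.pyRange 0 n 1).map (fun i => (i, g i)) := by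
  rw [PySem.List.enumerate_eq_map_pyRange _ 0]
  have hr : PySem.List.pyRange 0 (PySem.List.len ((PySem.List.pyRange 0 n 1).map g)) 1
      = PySem.List.pyRange 0 n 1 := by
    have h : (max n 0).toNat = n.toNat := by omega
    simp [PySem.List.len, PySem.List.pyRange_one, h]
  rw [hr]
  apply List.map_congr_left
  intro j hj
  rw [PySem.List.mem_pyRange_one] at hj
  rw [PySem.List.pyGetD_map_pyRange_of_nonneg g n j 0 hj.1 hj.2]

theorem pv_map_enum (n : Int) (g : Int → Int) (h : Int → Int) :
    (PySem.List.enumerate ((PySem.List.pyRange 0 n 1).map g)).map (fun ic => ic.2 + h ic.1)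
    = (PySem.List.pyRange 0 n 1).map (fun i => g i + h i) := by
  rw [pv_enum_range_map, List.map_map]
  rfl

theorem pv_stepB_eq (s : List Char) (n j : Int) (elem : String) (g : Int → Int) :
    pvStepB s ((PySem.List.pyRange 0 n 1).map g) (j, elem)
    = (PySem.List.pyRange 0 n 1).map (fun i => g i + pvContrib s i j elem.toList) := by
  simp only [pvStepB, pvContrib]
  split_ifs with h1 h2
  · exact pv_map_enum n g (fun i =>
      ((PySem.List.slice elem.toList (some 1) (some (-1))).map
        (fun ch => if PySem.List.pyGetD s (i + j) ' ' == ch then (1 : Int) else 0)).sum)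
  · exact pv_map_enum n g (fun i =>
      ((PySem.List.slice elem.toList (some 1) (some (-1))).map
        (fun ch => if PySem.List.pyGetD s (i + j) ' ' != ch then (1 : Int) else 0)).sum)
  · exact pv_map_enum n g (fun i =>
      if [PySem.List.pyGetD s (i + j) ' '] == elem.toList then (1 : Int) else 0)

-- B's whole 'for j, elem' pass: each position ends up with the sum of its contributions
theorem pv_foldB (s : List Char) (n : Int) (ms : List (Int × String)) (g : Int → Int) :
    ms.foldl (pvStepB s) ((PySem.List.pyRange 0 n 1).map g)
    = (PySem.List.pyRange 0 n 1).map
        (fun i => g i + (ms.map (fun je => pvContrib s i je.1 je.2.toList)).sum) := by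
  induction ms generalizing g with
  | nil => simp
  | cons hd tl ih =>
    rcases hd with ⟨j, elem⟩
    rw [List.foldl_cons, pv_stepB_eq, ih]
    simp [add_assoc]

-- A's rolling counter at position i is that same sum of contributions
theorem pv_counterA (s : List Char) (motif : List String) (i : Int) :
    (PySem.List.pyRange 0 (motif.length : Int) 1).foldl
      (fun counter j => pvStepA s i j (PySem.List.pyGetD motif j "").toList counter) (0 : Int)
    = ((PySem.List.enumerate motif).map (fun je => pvContrib s i je.1 je.2.toList)).sum := by
  simp only [pv_stepA_eq]
  rw [PySem.List.foldl_add (PySem.List.pyRange 0 (motif.length : Int) 1)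
        (fun j => pvContrib s i j (PySem.List.pyGetD motif j "").toList) 0]
  rw [PySem.List.enumerate_eq_map_pyRange motif "", List.map_map]
  simp [PySem.List.len, Function.comp_def]

theorem pv_main (ps : String) (motif : List String) :
    locateProteinMotif ps motif = locateProteinMotif_alt ps motif := by
  unfold locateProteinMotif locateProteinMotif_alt
  set s := ps.toList with hs
  set n : Int := (s.length : Int) - motif.length + 1 with hn
  rw [PySem.List.foldl_append_if
        (fun i => ((PySem.List.pyRange 0 (motif.length : Int) 1).foldl
          (fun counter j => pvStepA s i j (PySem.List.pyGetD motif j "").toList counter) (0 : Int)) == 4)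
        (fun i => i + 1) (PySem.List.pyRange 0 n 1) []]
  by_cases h0 : n ≤ 0
  · rw [if_pos h0, PySem.List.pyRange_one_eq_nil h0]
    rfl
  · rw [if_neg h0]
    have hrep : List.replicate n.toNat (0 : Int) = (PySem.List.pyRange 0 n 1).map (fun _ => 0) := by
      rw [PySem.List.pyRange_one, List.map_map]
      simp [Function.comp_def, List.map_const']
    rw [hrep]
    dsimp only
    rw [pv_foldB, pv_enum_range_map, List.filter_map, List.map_map]
    simp only [pv_counterA, List.nil_append, Function.comp_def, zero_add]

-- ===== VERDICT (by name: the statement is the Claim_ definition above) =====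
theorem locateProteinMotif_spec : Claim_equal_locateProteinMotif := by
  intro proteinString motif _ _
  unfold Spec_locateProteinMotif
  exact pv_main proteinString motif
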